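-- pv_equiv track=rewrite | github.com/charleslo/opentuner | examples/mario/mario.py | fm2_smb
-- ===== SOURCE A (Python) =====
-- def fm2_line(up, down, left, right, a, b, start, select, reset=False):
--   """formats one frame of input with the given button presses"""
--   return ''.join(('|1|' if reset else '|0|') +
--     ('R' if right else '.') +
--     ('L' if left else '.') +
--     ('D' if down else '.') +
--     ('U' if up else '.') +
--     ('T' if start else '.') +
--     ('D' if select else '.') +
--     ('B' if b else '.') +
--     ('A' if a else '.') +
--     '|........||')
--
-- def maxd(iterable, default):
--   try:
--     return max(iterable)
--   except ValueError:
--     return default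
--
-- def fm2_lines(up, down, left, right, a, b, start, select, reset=set(), minFrame=None, maxFrame=None):
--   """formats many frames using the given button-press sets"""
--   if minFrame is None:
--     minFrame = 0
--   if maxFrame is None:
--     maxFrame = max(maxd(up, 0), maxd(down, 0), maxd(left, 0), maxd(right, 0), maxd(a, 0), maxd(b, 0), maxd(start, 0), maxd(select, 0), maxd(reset, 0)) + 1
--   lines = list()
--   for i in range(minFrame, maxFrame):
--     lines.append(fm2_line(i in up, i in down, i in left, i in right, i in a, i in b, i in start, i in select, i in reset))
--   return lines
--
-- def fm2_smb_header():
--   return ["version 3",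
--     "emuVersion 9828",
--     "romFilename smb.nes",
--     "romChecksum base64:jjYwGG411HcjG/j9UOVM3Q==",
--     "guid 51473540-E9D7-11E3-ADFC-46CE3219C4E0",
--     "fourscore 0",
--     "port0 1",
--     "port1 1",
--     "port2 0"]
--
-- def fm2_smb(left, right, down, b, a, header=True, padding=True, minFrame=None, maxFrame=None):
--   reset = set()
--   start = set()
--   if padding:
--     left = set([x+196 for x in left])
--     right = set([x+196 for x in right])
--     down = set([x+196 for x in down])
--     b = set([x+196 for x in b])
--     a = set([x+196 for x in a])
--     reset.add(0)
--     start.add(33)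
--   lines = fm2_lines(set(), down, left, right, a, b, start, set(), reset, minFrame, maxFrame)
--   if header:
--     return "\n".join(fm2_smb_header() + lines)
--   else:
--     return "\n".join(lines)
-- ===== SOURCE B (Python) =====
-- FM2_HEADER = ["version 3",
--     "emuVersion 9828",
--     "romFilename smb.nes",
--     "romChecksum base64:jjYwGG411HcjG/j9UOVM3Q==",
--     "guid 51473540-E9D7-11E3-ADFC-46CE3219C4E0",
--     "fourscore 0",
--     "port0 1",
--     "port1 1",
--     "port2 0"]
--
-- FM2_IDLE = '|0|........|........||'
--
-- def fm2_smb(left, right, down, b, a, header=True, padding=True, minFrame=None, maxFrame=None):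
--     shift = 196 if padding else 0
--     L = set(x + shift for x in left)
--     R = set(x + shift for x in right)
--     D = set(x + shift for x in down)
--     Bs = set(x + shift for x in b)
--     As = set(x + shift for x in a)
--     reset = {0} if padding else set()
--     start = {33} if padding else set()
--     active = L | R | D | Bs | As | reset | start
--     lo = 0 if minFrame is None else minFrame
--     hi = maxFrame if maxFrame is not None else max(0, max(active, default=0)) + 1
--     lines = [FM2_IDLE] * max(hi - lo, 0)
--     for f in active:
--         if lo <= f < hi:
--             lines[f - lo] = (('|1|' if f in reset else '|0|') +
--                 ('R' if f in R else '.') +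
--                 ('L' if f in L else '.') +
--                 ('D' if f in D else '.') +
--                 '.' +
--                 ('T' if f in start else '.') +
--                 '.' +
--                 ('B' if f in Bs else '.') +
--                 ('A' if f in As else '.') +
--                 '|........||')
--     if header:
--         return "\n".join(FM2_HEADER + lines)
--     return "\n".join(lines)
-- ===== Notes on version B (the rewrite author's own statement) =====
-- stated objective: alternative
-- what changed: Instead of formatting every frame in range by testing it against every button set, B prefills the whole range with the constant idle line and overwrites only the slots of frames that occur in some button/reset/start set (union of the sets), computing the frame bounds from a single max over that union.
import Mathlib
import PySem

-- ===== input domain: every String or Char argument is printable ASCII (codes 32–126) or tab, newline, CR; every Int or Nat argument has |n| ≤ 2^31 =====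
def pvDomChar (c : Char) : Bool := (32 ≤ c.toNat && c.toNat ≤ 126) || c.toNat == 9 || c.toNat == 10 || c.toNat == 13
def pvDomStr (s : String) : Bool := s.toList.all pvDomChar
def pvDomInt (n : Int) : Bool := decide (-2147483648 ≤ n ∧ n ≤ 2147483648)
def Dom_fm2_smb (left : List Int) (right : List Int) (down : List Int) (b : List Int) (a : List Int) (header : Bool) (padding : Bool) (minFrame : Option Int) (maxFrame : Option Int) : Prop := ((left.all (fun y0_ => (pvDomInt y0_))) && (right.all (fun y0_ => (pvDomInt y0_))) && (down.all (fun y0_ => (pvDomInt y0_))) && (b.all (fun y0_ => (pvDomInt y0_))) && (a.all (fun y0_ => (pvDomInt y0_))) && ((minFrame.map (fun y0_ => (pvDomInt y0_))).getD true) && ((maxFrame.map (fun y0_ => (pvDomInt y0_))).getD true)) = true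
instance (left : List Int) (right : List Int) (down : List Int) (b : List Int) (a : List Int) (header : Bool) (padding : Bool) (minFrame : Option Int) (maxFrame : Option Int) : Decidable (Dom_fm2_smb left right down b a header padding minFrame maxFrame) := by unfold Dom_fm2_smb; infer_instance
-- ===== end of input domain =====

-- B builds the frame list sparsely: a prefilled list of idle lines, overwriting only the slots of
-- frames that appear in some button-press set, instead of re-testing every frame against every set.


-- ===== PORT A =====
def fm2Line (up down left right a b start select reset : Bool) : String :=
  (if reset then "|1|" else "|0|") ++
  (if right then "R" else ".") ++
  (if left then "L" else ".") ++
  (if down then "D" else ".") ++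
  (if up then "U" else ".") ++
  (if start then "T" else ".") ++
  (if select then "D" else ".") ++
  (if b then "B" else ".") ++
  (if a then "A" else ".") ++
  "|........||"

-- maxd: max(iterable) with a default on the empty iterable (ValueError branch)
def maxdA (xs : List Int) (d : Int) : Int :=
  match PySem.List.max? xs (fun y => y) with
  | some m => m
  | none => d

def fm2Lines (up down left right a b start select reset : List Int)
    (minFrame maxFrame : Option Int) : List String :=
  let minF : Int := match minFrame with | none => 0 | some m => m
  let maxF : Int := match maxFrame with
    | none =>
        (max (maxdA up 0) (max (maxdA down 0) (max (maxdA left 0) (max (maxdA right 0)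
          (max (maxdA a 0) (max (maxdA b 0) (max (maxdA start 0) (max (maxdA select 0)
            (maxdA reset 0))))))))) + 1
    | some m => m
  (PySem.List.pyRange minF maxF).foldl (fun lines i =>
    lines ++ [fm2Line (decide (i ∈ up)) (decide (i ∈ down)) (decide (i ∈ left))
      (decide (i ∈ right)) (decide (i ∈ a)) (decide (i ∈ b)) (decide (i ∈ start))
      (decide (i ∈ select)) (decide (i ∈ reset))]) []

def fm2SmbHeader : List String :=
  ["version 3",
   "emuVersion 9828",
   "romFilename smb.nes",
   "romChecksum base64:jjYwGG411HcjG/j9UOVM3Q==",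
   "guid 51473540-E9D7-11E3-ADFC-46CE3219C4E0",
   "fourscore 0",
   "port0 1",
   "port1 1",
   "port2 0"]

def fm2_smb (left : List Int) (right : List Int) (down : List Int) (b : List Int) (a : List Int) (header : Bool) (padding : Bool) (minFrame : Option Int) (maxFrame : Option Int) : String :=
  let reset0 : PySem.Set Int := PySem.Set.empty
  let start0 : PySem.Set Int := PySem.Set.empty
  match (if padding then
      (PySem.Set.ofList (left.map (fun x => x + 196)),
       PySem.Set.ofList (right.map (fun x => x + 196)),
       PySem.Set.ofList (down.map (fun x => x + 196)),
       PySem.Set.ofList (b.map (fun x => x + 196)),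
       PySem.Set.ofList (a.map (fun x => x + 196)),
       PySem.Set.add reset0 0,
       PySem.Set.add start0 33)
    else (left, right, down, b, a, reset0, start0)) with
  | (left', right', down', b', a', reset, start) =>
    let lines := fm2Lines PySem.Set.empty down' left' right' a' b' start PySem.Set.empty reset minFrame maxFrame
    if header then PySem.Str.join "\n" (fm2SmbHeader ++ lines)
    else PySem.Str.join "\n" lines

-- ===== PORT B =====
def fm2IdleLine : String := "|0|........|........||"

def fm2HeaderAlt : List String :=
  ["version 3",
   "emuVersion 9828",
   "romFilename smb.nes",
   "romChecksum base64:jjYwGG411HcjG/j9UOVM3Q==",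
   "guid 51473540-E9D7-11E3-ADFC-46CE3219C4E0",
   "fourscore 0",
   "port0 1",
   "port1 1",
   "port2 0"]

def fm2_smb_alt (left : List Int) (right : List Int) (down : List Int) (b : List Int) (a : List Int) (header : Bool) (padding : Bool) (minFrame : Option Int) (maxFrame : Option Int) : String :=
  let shift : Int := if padding then 196 else 0
  let L := PySem.Set.ofList (left.map (fun x => x + shift))
  let R := PySem.Set.ofList (right.map (fun x => x + shift))
  let D := PySem.Set.ofList (down.map (fun x => x + shift))
  let Bs := PySem.Set.ofList (b.map (fun x => x + shift))
  let As := PySem.Set.ofList (a.map (fun x => x + shift))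
  let reset : PySem.Set Int := if padding then PySem.Set.ofList [0] else PySem.Set.empty
  let start : PySem.Set Int := if padding then PySem.Set.ofList [33] else PySem.Set.empty
  let active : PySem.Set Int :=
    PySem.Set.union (PySem.Set.union (PySem.Set.union (PySem.Set.union (PySem.Set.union
      (PySem.Set.union L R) D) Bs) As) reset) start
  let lo : Int := match minFrame with | some m => m | none => 0
  let hi : Int := match maxFrame with
    | some m => m
    | none => max 0 (PySem.List.maxD active (fun y => y) 0) + 1
  let base := PySem.List.pyRepeat [fm2IdleLine] (max (hi - lo) 0)
  let lines := active.foldl (fun ls f =>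
    if lo ≤ f ∧ f < hi then
      PySem.List.pySetD ls (f - lo)
        ((if f ∈ reset then "|1|" else "|0|") ++
         (if f ∈ R then "R" else ".") ++
         (if f ∈ L then "L" else ".") ++
         (if f ∈ D then "D" else ".") ++
         "." ++
         (if f ∈ start then "T" else ".") ++
         "." ++
         (if f ∈ Bs then "B" else ".") ++
         (if f ∈ As then "A" else ".") ++
         "|........||")
    else ls) base
  if header then PySem.Str.join "\n" (fm2HeaderAlt ++ lines)
  else PySem.Str.join "\n" lines

-- ===== PRECONDITION & SPEC =====
def Spec_fm2_smb (left : List Int) (right : List Int) (down : List Int) (b : List Int) (a : List Int) (header : Bool) (padding : Bool) (minFrame : Option Int) (maxFrame : Option Int) (out : String) : Prop := out = fm2_smb_alt left right down b a header padding minFrame maxFrame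
instance (left : List Int) (right : List Int) (down : List Int) (b : List Int) (a : List Int) (header : Bool) (padding : Bool) (minFrame : Option Int) (maxFrame : Option Int) (out : String) : Decidable (Spec_fm2_smb left right down b a header padding minFrame maxFrame out) := by unfold Spec_fm2_smb; infer_instance

-- ===== CLAIM (what is proved, stated in full; the proofs are below) =====
def Claim_equal_fm2_smb : Prop := ∀ (left : List Int) (right : List Int) (down : List Int) (b : List Int) (a : List Int) (header : Bool) (padding : Bool) (minFrame : Option Int) (maxFrame : Option Int), Dom_fm2_smb left right down b a header padding minFrame maxFrame → Spec_fm2_smb left right down b a header padding minFrame maxFrame (fm2_smb left right down b a header padding minFrame maxFrame)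

-- ===== LEMMAS AND PROOFS =====

-- B's line-formatting expression as a function of the frame, for the proofs
def altFmt (L R D Bs As reset start : List Int) (f : Int) : String :=
  (if f ∈ reset then "|1|" else "|0|") ++
  (if f ∈ R then "R" else ".") ++
  (if f ∈ L then "L" else ".") ++
  (if f ∈ D then "D" else ".") ++
  "." ++
  (if f ∈ start then "T" else ".") ++
  "." ++
  (if f ∈ Bs then "B" else ".") ++
  (if f ∈ As then "A" else ".") ++
  "|........||"

lemma maxdA_isMax (xs : List Int) (d y : Int) (hy : y ∈ xs) : y ≤ maxdA xs d := by
  unfold maxdA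
  cases h : PySem.List.max? xs (fun y => y) with
  | none => rw [PySem.List.max?_eq_none_iff] at h; simp [h] at hy
  | some m => exact PySem.List.max?_isMax h y hy

lemma maxdA_cases (xs : List Int) (d : Int) : maxdA xs d = d ∨ maxdA xs d ∈ xs := by
  unfold maxdA
  cases h : PySem.List.max? xs (fun y => y) with
  | none => exact Or.inl rfl
  | some m => exact Or.inr (PySem.List.max?_mem h)

lemma maxD_eq_maxdA (xs : List Int) (d : Int) :
    PySem.List.maxD xs (fun y => y) d = maxdA xs d := by
  unfold maxdA
  cases xs with
  | nil => rfl
  | cons h t =>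
    show (PySem.List.max? (h :: t) (fun y => y)).getD d = _
    cases PySem.List.max? (h :: t) (fun y => y) <;> rfl

lemma fold_getElem? (lo hi : Int) (fmt : Int → String) :
    ∀ (act : List Int) (base : List String), base.length = (hi - lo).toNat →
      ∀ j : Nat, j < base.length →
        (act.foldl (fun ls f =>
          if lo ≤ f ∧ f < hi then PySem.List.pySetD ls (f - lo) (fmt f) else ls) base)[j]? =
        if (lo + (j : Int)) ∈ act then some (fmt (lo + (j : Int))) else base[j]? := by
  intro act
  induction act with
  | nil => intro base _ j _; simp
  | cons x t ih =>
    intro base hlen j hj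
    simp only [List.foldl_cons]
    by_cases hg : lo ≤ x ∧ x < hi
    · rw [if_pos hg, PySem.List.pySetD_of_nonneg _ _ (by omega)]
      rw [ih _ (by simp [hlen]) j (by simpa using hj)]
      by_cases hmt : (lo + (j : Int)) ∈ t
      · simp [hmt]
      · by_cases hxj : x = lo + (j : Int)
        · subst hxj
          have hidx : (lo + (j : Int) - lo).toNat = j := by omega
          simp [hj]
        · have hidx : ¬ ((x - lo).toNat = j) := by
            rw [hlen] at hj; omega
          have hnm : (lo + (j : Int)) ∉ x :: t := by
            intro hmem; rcases List.mem_cons.1 hmem with h | h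
            · exact hxj h.symm
            · exact hmt h
          simp [hnm, hmt, hidx]
    · rw [if_neg hg, ih _ hlen j hj]
      rw [hlen] at hj
      by_cases hmt : (lo + (j : Int)) ∈ t
      · simp [hmt]
      · have hnm : (lo + (j : Int)) ∉ x :: t := by
          intro hmem; rcases List.mem_cons.1 hmem with h | h
          · exact hg (by omega)
          · exact hmt h
        simp [hnm, hmt]

lemma fold_length (lo hi : Int) (fmt : Int → String) (act : List Int) (base : List String) :
    (act.foldl (fun ls f =>
      if lo ≤ f ∧ f < hi then PySem.List.pySetD ls (f - lo) (fmt f) else ls) base).length =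
    base.length := by
  induction act generalizing base with
  | nil => rfl
  | cons x t ih =>
    simp only [List.foldl_cons]
    rw [ih]
    by_cases hg : lo ≤ x ∧ x < hi
    · simp [hg, PySem.List.length_pySetD]
    · simp [hg]

lemma fold_eq_map (lo hi : Int) (fmt : Int → String) (dflt : String) (act : List Int) :
    act.foldl (fun ls f =>
      if lo ≤ f ∧ f < hi then PySem.List.pySetD ls (f - lo) (fmt f) else ls)
      (List.replicate (hi - lo).toNat dflt) =
    (PySem.List.pyRange lo hi).map (fun i => if i ∈ act then fmt i else dflt) := by
  apply List.ext_getElem?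
  intro j
  by_cases hj : j < (hi - lo).toNat
  · rw [fold_getElem? lo hi fmt act _ (by simp) j (by simp [hj])]
    rw [PySem.List.pyRange_one]
    rw [List.map_map]
    rw [List.getElem?_map, List.getElem?_range hj]
    simp only [Option.map_some]
    by_cases hm : (lo + (j : Int)) ∈ act
    · simp [hm]
    · simp [hm, hj]
  · have h1 : (List.replicate (hi - lo).toNat dflt).length = (hi - lo).toNat := by simp
    rw [List.getElem?_eq_none (by rw [fold_length]; simpa using Nat.le_of_not_lt hj)]
    rw [List.getElem?_eq_none (by simp [PySem.List.pyRange_one]; omega)]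

lemma line_eq (lA rA dA bA aA stA rsA LB RB DB BB AB rsB stB active : List Int)
    (hL : ∀ i : Int, i ∈ LB ↔ i ∈ lA) (hR : ∀ i : Int, i ∈ RB ↔ i ∈ rA)
    (hD : ∀ i : Int, i ∈ DB ↔ i ∈ dA) (hB : ∀ i : Int, i ∈ BB ↔ i ∈ bA)
    (hA : ∀ i : Int, i ∈ AB ↔ i ∈ aA) (hrs : ∀ i : Int, i ∈ rsB ↔ i ∈ rsA)
    (hst : ∀ i : Int, i ∈ stB ↔ i ∈ stA)
    (hAct : ∀ y : Int, y ∈ active ↔ (y ∈ LB ∨ y ∈ RB ∨ y ∈ DB ∨ y ∈ BB ∨ y ∈ AB ∨ y ∈ rsB ∨ y ∈ stB))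
    (i : Int) :
    fm2Line (decide (i ∈ (PySem.Set.empty : PySem.Set Int))) (decide (i ∈ dA))
      (decide (i ∈ lA)) (decide (i ∈ rA)) (decide (i ∈ aA)) (decide (i ∈ bA))
      (decide (i ∈ stA)) (decide (i ∈ (PySem.Set.empty : PySem.Set Int))) (decide (i ∈ rsA)) =
    if i ∈ active then altFmt LB RB DB BB AB rsB stB i else fm2IdleLine := by
  by_cases hact : i ∈ active
  · rw [if_pos hact]
    simp only [fm2Line, altFmt, hL i, hR i, hD i, hB i, hA i, hrs i, hst i]
    simp [PySem.Set.empty]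
  · rw [if_neg hact]
    have hno := fun h => hact ((hAct i).2 h)
    have hnL : i ∉ lA := fun h => hno (Or.inl ((hL i).2 h))
    have hnR : i ∉ rA := fun h => hno (Or.inr (Or.inl ((hR i).2 h)))
    have hnD : i ∉ dA := fun h => hno (Or.inr (Or.inr (Or.inl ((hD i).2 h))))
    have hnB : i ∉ bA := fun h => hno (Or.inr (Or.inr (Or.inr (Or.inl ((hB i).2 h)))))
    have hnA : i ∉ aA := fun h => hno (Or.inr (Or.inr (Or.inr (Or.inr (Or.inl ((hA i).2 h))))))
    have hnrs : i ∉ rsA := fun h => hno (Or.inr (Or.inr (Or.inr (Or.inr (Or.inr (Or.inl ((hrs i).2 h)))))))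
    have hnst : i ∉ stA := fun h => hno (Or.inr (Or.inr (Or.inr (Or.inr (Or.inr (Or.inr ((hst i).2 h)))))))
    simp only [fm2Line]
    simp [PySem.Set.empty, fm2IdleLine, hnL, hnR, hnD, hnB, hnA, hnrs, hnst]

set_option maxHeartbeats 1000000 in
lemma hi_core (lA rA dA bA aA stA rsA LB RB DB BB AB rsB stB active : List Int)
    (hL : ∀ i : Int, i ∈ LB ↔ i ∈ lA) (hR : ∀ i : Int, i ∈ RB ↔ i ∈ rA)
    (hD : ∀ i : Int, i ∈ DB ↔ i ∈ dA) (hB : ∀ i : Int, i ∈ BB ↔ i ∈ bA)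
    (hA : ∀ i : Int, i ∈ AB ↔ i ∈ aA) (hrs : ∀ i : Int, i ∈ rsB ↔ i ∈ rsA)
    (hst : ∀ i : Int, i ∈ stB ↔ i ∈ stA)
    (hAct : ∀ y : Int, y ∈ active ↔ (y ∈ LB ∨ y ∈ RB ∨ y ∈ DB ∨ y ∈ BB ∨ y ∈ AB ∨ y ∈ rsB ∨ y ∈ stB)) :
    max (maxdA PySem.Set.empty 0) (max (maxdA dA 0) (max (maxdA lA 0) (max (maxdA rA 0)
      (max (maxdA aA 0) (max (maxdA bA 0) (max (maxdA stA 0) (max (maxdA PySem.Set.empty 0)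
        (maxdA rsA 0)))))))) =
    max 0 (PySem.List.maxD active (fun y => y) 0) := by
  rw [maxD_eq_maxdA]
  have hmem : ∀ y : Int, (y ∈ lA ∨ y ∈ rA ∨ y ∈ dA ∨ y ∈ bA ∨ y ∈ aA ∨ y ∈ rsA ∨ y ∈ stA) → y ∈ active := by
    intro y hy
    rw [hAct y, hL y, hR y, hD y, hB y, hA y, hrs y, hst y]
    tauto
  have key : ∀ xs : List Int, (∀ y ∈ xs, y ∈ active) →
      maxdA xs 0 = 0 ∨ maxdA xs 0 ≤ maxdA active 0 := by
    intro xs hxs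
    rcases maxdA_cases xs 0 with h | h
    · exact Or.inl h
    · exact Or.inr (maxdA_isMax active 0 _ (hxs _ h))
  have hD' := key dA (fun y hy => hmem y (by tauto))
  have hL' := key lA (fun y hy => hmem y (by tauto))
  have hR' := key rA (fun y hy => hmem y (by tauto))
  have hA' := key aA (fun y hy => hmem y (by tauto))
  have hB' := key bA (fun y hy => hmem y (by tauto))
  have hst' := key stA (fun y hy => hmem y (by tauto))
  have hrs' := key rsA (fun y hy => hmem y (by tauto))
  have hup : maxdA PySem.Set.empty 0 = (0 : Int) := rfl
  have hact' : maxdA active 0 = 0 ∨ maxdA active 0 ≤ maxdA dA 0 ∨ maxdA active 0 ≤ maxdA lA 0 ∨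
      maxdA active 0 ≤ maxdA rA 0 ∨ maxdA active 0 ≤ maxdA aA 0 ∨ maxdA active 0 ≤ maxdA bA 0 ∨
      maxdA active 0 ≤ maxdA stA 0 ∨ maxdA active 0 ≤ maxdA rsA 0 := by
    rcases maxdA_cases active 0 with h | h
    · exact Or.inl h
    · right
      rw [hAct _, hL _, hR _, hD _, hB _, hA _, hrs _, hst _] at h
      rcases h with h | h | h | h | h | h | h
      · exact Or.inr (Or.inl (maxdA_isMax _ _ _ h))
      · exact Or.inr (Or.inr (Or.inl (maxdA_isMax _ _ _ h)))
      · exact Or.inl (maxdA_isMax _ _ _ h)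
      · exact Or.inr (Or.inr (Or.inr (Or.inr (Or.inl (maxdA_isMax _ _ _ h)))))
      · exact Or.inr (Or.inr (Or.inr (Or.inl (maxdA_isMax _ _ _ h))))
      · exact Or.inr (Or.inr (Or.inr (Or.inr (Or.inr (Or.inr (maxdA_isMax _ _ _ h))))))
      · exact Or.inr (Or.inr (Or.inr (Or.inr (Or.inr (Or.inl (maxdA_isMax _ _ _ h))))))
  apply le_antisymm
  · refine max_le ?_ (max_le ?_ (max_le ?_ (max_le ?_ (max_le ?_ (max_le ?_ (max_le ?_ (max_le ?_ ?_)))))))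
    · rw [hup]; exact le_max_left _ _
    · rcases hD' with h | h
      · rw [h]; exact le_max_left _ _
      · exact le_trans h (le_max_right _ _)
    · rcases hL' with h | h
      · rw [h]; exact le_max_left _ _
      · exact le_trans h (le_max_right _ _)
    · rcases hR' with h | h
      · rw [h]; exact le_max_left _ _
      · exact le_trans h (le_max_right _ _)
    · rcases hA' with h | h
      · rw [h]; exact le_max_left _ _
      · exact le_trans h (le_max_right _ _)
    · rcases hB' with h | h
      · rw [h]; exact le_max_left _ _
      · exact le_trans h (le_max_right _ _)
    · rcases hst' with h | h
      · rw [h]; exact le_max_left _ _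
      · exact le_trans h (le_max_right _ _)
    · rw [hup]; exact le_max_left _ _
    · rcases hrs' with h | h
      · rw [h]; exact le_max_left _ _
      · exact le_trans h (le_max_right _ _)
  · apply max_le
    · simp only [le_max_iff]
      exact Or.inl (le_of_eq hup.symm)
    · simp only [le_max_iff]
      rcases hact' with h | h | h | h | h | h | h | h
      · exact Or.inl (by rw [h, hup])
      · exact Or.inr (Or.inl h)
      · exact Or.inr (Or.inr (Or.inl h))
      · exact Or.inr (Or.inr (Or.inr (Or.inl h)))
      · exact Or.inr (Or.inr (Or.inr (Or.inr (Or.inl h))))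
      · exact Or.inr (Or.inr (Or.inr (Or.inr (Or.inr (Or.inl h)))))
      · exact Or.inr (Or.inr (Or.inr (Or.inr (Or.inr (Or.inr (Or.inl h))))))
      · exact Or.inr (Or.inr (Or.inr (Or.inr (Or.inr (Or.inr (Or.inr (Or.inr h)))))))

lemma lines_core (lA rA dA bA aA stA rsA LB RB DB BB AB rsB stB active : List Int)
    (hL : ∀ i : Int, i ∈ LB ↔ i ∈ lA) (hR : ∀ i : Int, i ∈ RB ↔ i ∈ rA)
    (hD : ∀ i : Int, i ∈ DB ↔ i ∈ dA) (hB : ∀ i : Int, i ∈ BB ↔ i ∈ bA)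
    (hA : ∀ i : Int, i ∈ AB ↔ i ∈ aA) (hrs : ∀ i : Int, i ∈ rsB ↔ i ∈ rsA)
    (hst : ∀ i : Int, i ∈ stB ↔ i ∈ stA)
    (hAct : ∀ y : Int, y ∈ active ↔ (y ∈ LB ∨ y ∈ RB ∨ y ∈ DB ∨ y ∈ BB ∨ y ∈ AB ∨ y ∈ rsB ∨ y ∈ stB))
    (lo hi : Int) :
    (PySem.List.pyRange lo hi).foldl (fun lines i =>
      lines ++ [fm2Line (decide (i ∈ (PySem.Set.empty : PySem.Set Int))) (decide (i ∈ dA))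
        (decide (i ∈ lA)) (decide (i ∈ rA)) (decide (i ∈ aA)) (decide (i ∈ bA))
        (decide (i ∈ stA)) (decide (i ∈ (PySem.Set.empty : PySem.Set Int))) (decide (i ∈ rsA))]) [] =
    active.foldl (fun ls f =>
      if lo ≤ f ∧ f < hi then
        PySem.List.pySetD ls (f - lo) (altFmt LB RB DB BB AB rsB stB f)
      else ls) (PySem.List.pyRepeat [fm2IdleLine] (max (hi - lo) 0)) := by
  rw [PySem.List.foldl_append_singleton_eq_map, List.nil_append]
  rw [PySem.List.pyRepeat_singleton]
  have hmax : (max (hi - lo) 0).toNat = (hi - lo).toNat := by omega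
  rw [hmax, fold_eq_map lo hi _ fm2IdleLine active]
  exact List.map_congr_left (fun i _ =>
    line_eq lA rA dA bA aA stA rsA LB RB DB BB AB rsB stB active hL hR hD hB hA hrs hst hAct i)

lemma lines_eq (lA rA dA bA aA stA rsA LB RB DB BB AB rsB stB active : List Int)
    (hL : ∀ i : Int, i ∈ LB ↔ i ∈ lA) (hR : ∀ i : Int, i ∈ RB ↔ i ∈ rA)
    (hD : ∀ i : Int, i ∈ DB ↔ i ∈ dA) (hB : ∀ i : Int, i ∈ BB ↔ i ∈ bA)
    (hA : ∀ i : Int, i ∈ AB ↔ i ∈ aA) (hrs : ∀ i : Int, i ∈ rsB ↔ i ∈ rsA)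
    (hst : ∀ i : Int, i ∈ stB ↔ i ∈ stA)
    (hAct : ∀ y : Int, y ∈ active ↔ (y ∈ LB ∨ y ∈ RB ∨ y ∈ DB ∨ y ∈ BB ∨ y ∈ AB ∨ y ∈ rsB ∨ y ∈ stB))
    (minF maxF : Option Int) :
    fm2Lines PySem.Set.empty dA lA rA aA bA stA PySem.Set.empty rsA minF maxF =
    (let lo : Int := match minF with | some m => m | none => 0
     let hi : Int := match maxF with
       | some m => m
       | none => max 0 (PySem.List.maxD active (fun y => y) 0) + 1
     active.foldl (fun ls f =>
       if lo ≤ f ∧ f < hi then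
         PySem.List.pySetD ls (f - lo) (altFmt LB RB DB BB AB rsB stB f)
       else ls) (PySem.List.pyRepeat [fm2IdleLine] (max (hi - lo) 0))) := by
  unfold fm2Lines
  cases minF with
  | none =>
    cases maxF with
    | none =>
      simp only
      rw [hi_core lA rA dA bA aA stA rsA LB RB DB BB AB rsB stB active hL hR hD hB hA hrs hst hAct]
      exact lines_core lA rA dA bA aA stA rsA LB RB DB BB AB rsB stB active hL hR hD hB hA hrs hst hAct _ _
    | some m =>
      simp only
      exact lines_core lA rA dA bA aA stA rsA LB RB DB BB AB rsB stB active hL hR hD hB hA hrs hst hAct _ _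
  | some m0 =>
    cases maxF with
    | none =>
      simp only
      rw [hi_core lA rA dA bA aA stA rsA LB RB DB BB AB rsB stB active hL hR hD hB hA hrs hst hAct]
      exact lines_core lA rA dA bA aA stA rsA LB RB DB BB AB rsB stB active hL hR hD hB hA hrs hst hAct _ _
    | some m =>
      simp only
      exact lines_core lA rA dA bA aA stA rsA LB RB DB BB AB rsB stB active hL hR hD hB hA hrs hst hAct _ _

-- ===== VERDICT (by name: the statement is the Claim_ definition above) =====
theorem fm2_smb_spec : Claim_equal_fm2_smb := by
  unfold Claim_equal_fm2_smb
  intro left right down b a header padding minFrame maxFrame _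
  unfold Spec_fm2_smb fm2_smb fm2_smb_alt
  cases padding with
  | false =>
    simp only [Bool.false_eq_true, if_false]
    have hL : ∀ i : Int, i ∈ PySem.Set.ofList (List.map (fun x => x + 0) left) ↔ i ∈ left := by
      intro i; simp [PySem.Set.mem_ofList]
    have hR : ∀ i : Int, i ∈ PySem.Set.ofList (List.map (fun x => x + 0) right) ↔ i ∈ right := by
      intro i; simp [PySem.Set.mem_ofList]
    have hD : ∀ i : Int, i ∈ PySem.Set.ofList (List.map (fun x => x + 0) down) ↔ i ∈ down := by
      intro i; simp [PySem.Set.mem_ofList]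
    have hB : ∀ i : Int, i ∈ PySem.Set.ofList (List.map (fun x => x + 0) b) ↔ i ∈ b := by
      intro i; simp [PySem.Set.mem_ofList]
    have hA : ∀ i : Int, i ∈ PySem.Set.ofList (List.map (fun x => x + 0) a) ↔ i ∈ a := by
      intro i; simp [PySem.Set.mem_ofList]
    have hE : ∀ i : Int, i ∈ (PySem.Set.empty : PySem.Set Int) ↔ i ∈ (PySem.Set.empty : PySem.Set Int) :=
      fun _ => Iff.rfl
    have hAct : ∀ y : Int, y ∈ PySem.Set.union (PySem.Set.union (PySem.Set.union (PySem.Set.union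
        (PySem.Set.union (PySem.Set.union (PySem.Set.ofList (List.map (fun x => x + 0) left))
          (PySem.Set.ofList (List.map (fun x => x + 0) right)))
          (PySem.Set.ofList (List.map (fun x => x + 0) down)))
          (PySem.Set.ofList (List.map (fun x => x + 0) b)))
          (PySem.Set.ofList (List.map (fun x => x + 0) a)))
          (PySem.Set.empty : PySem.Set Int)) (PySem.Set.empty : PySem.Set Int) ↔
        (y ∈ PySem.Set.ofList (List.map (fun x => x + 0) left) ∨
         y ∈ PySem.Set.ofList (List.map (fun x => x + 0) right) ∨
         y ∈ PySem.Set.ofList (List.map (fun x => x + 0) down) ∨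
         y ∈ PySem.Set.ofList (List.map (fun x => x + 0) b) ∨
         y ∈ PySem.Set.ofList (List.map (fun x => x + 0) a) ∨
         y ∈ (PySem.Set.empty : PySem.Set Int) ∨ y ∈ (PySem.Set.empty : PySem.Set Int)) := by
      intro y; simp only [PySem.Set.mem_union]; tauto
    have key := lines_eq left right down b a PySem.Set.empty PySem.Set.empty
      (PySem.Set.ofList (List.map (fun x => x + 0) left))
      (PySem.Set.ofList (List.map (fun x => x + 0) right))
      (PySem.Set.ofList (List.map (fun x => x + 0) down))
      (PySem.Set.ofList (List.map (fun x => x + 0) b))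
      (PySem.Set.ofList (List.map (fun x => x + 0) a))
      PySem.Set.empty PySem.Set.empty _
      hL hR hD hB hA hE hE hAct minFrame maxFrame
    cases header with
    | true =>
      simp only [reduceIte]
      exact congrArg (PySem.Str.join "\n") (congrArg (fm2HeaderAlt ++ ·) key)
    | false =>
      simp only [Bool.false_eq_true, if_false]
      exact congrArg (PySem.Str.join "\n") key
  | true =>
    simp only [if_true]
    have hRfl : ∀ (s : List Int) (i : Int), i ∈ s ↔ i ∈ s := fun _ _ => Iff.rfl
    have hAct : ∀ y : Int, y ∈ PySem.Set.union (PySem.Set.union (PySem.Set.union (PySem.Set.union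
        (PySem.Set.union (PySem.Set.union (PySem.Set.ofList (List.map (fun x => x + 196) left))
          (PySem.Set.ofList (List.map (fun x => x + 196) right)))
          (PySem.Set.ofList (List.map (fun x => x + 196) down)))
          (PySem.Set.ofList (List.map (fun x => x + 196) b)))
          (PySem.Set.ofList (List.map (fun x => x + 196) a)))
          (PySem.Set.ofList ([0] : List Int))) (PySem.Set.ofList ([33] : List Int)) ↔
        (y ∈ PySem.Set.ofList (List.map (fun x => x + 196) left) ∨
         y ∈ PySem.Set.ofList (List.map (fun x => x + 196) right) ∨
         y ∈ PySem.Set.ofList (List.map (fun x => x + 196) down) ∨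
         y ∈ PySem.Set.ofList (List.map (fun x => x + 196) b) ∨
         y ∈ PySem.Set.ofList (List.map (fun x => x + 196) a) ∨
         y ∈ PySem.Set.ofList ([0] : List Int) ∨ y ∈ PySem.Set.ofList ([33] : List Int)) := by
      intro y; simp only [PySem.Set.mem_union]; tauto
    have key := lines_eq
      (PySem.Set.ofList (List.map (fun x => x + 196) left))
      (PySem.Set.ofList (List.map (fun x => x + 196) right))
      (PySem.Set.ofList (List.map (fun x => x + 196) down))
      (PySem.Set.ofList (List.map (fun x => x + 196) b))
      (PySem.Set.ofList (List.map (fun x => x + 196) a))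
      (PySem.Set.add PySem.Set.empty 33) (PySem.Set.add PySem.Set.empty 0)
      (PySem.Set.ofList (List.map (fun x => x + 196) left))
      (PySem.Set.ofList (List.map (fun x => x + 196) right))
      (PySem.Set.ofList (List.map (fun x => x + 196) down))
      (PySem.Set.ofList (List.map (fun x => x + 196) b))
      (PySem.Set.ofList (List.map (fun x => x + 196) a))
      (PySem.Set.ofList ([0] : List Int)) (PySem.Set.ofList ([33] : List Int)) _
      (hRfl _) (hRfl _) (hRfl _) (hRfl _) (hRfl _)
      (fun i => Iff.rfl) (fun i => Iff.rfl) hAct minFrame maxFrame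
    cases header with
    | true =>
      simp only [reduceIte]
      exact congrArg (PySem.Str.join "\n") (congrArg (fm2HeaderAlt ++ ·) key)
    | false =>
      simp only [Bool.false_eq_true, if_false]
      exact congrArg (PySem.Str.join "\n") key
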